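-- pv_equiv track=rewrite | github.com/emilesilvis/graph-rag-graph-agent | graph_rag_graph_agent/graph/schema.py | _tokens_overlap
-- ===== SOURCE A (Python) =====
-- def _tokens_overlap(a: tuple[str, ...], b: tuple[str, ...]) -> bool:
--     """True if any token in `a` shares a >=3-char prefix with any token in `b`."""
--     for x in a:
--         for y in b:
--             if len(x) < 3 or len(y) < 3:
--                 continue
--             if x.startswith(y) or y.startswith(x):
--                 return True
--     return False
-- ===== SOURCE B (Python) =====
-- def _tokens_overlap(a: tuple[str, ...], b: tuple[str, ...]) -> bool:
--     """True if any token in `a` shares a >=3-char prefix with any token in `b`.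
--
--     Instead of comparing every pair, index b once: `bset` holds b's tokens of
--     length >= 3 and `pset` every prefix (length >= 3) of those tokens.  A token
--     x of a overlaps b iff x itself is such a prefix (some y starts with x) or
--     some prefix of x is a token of b (x starts with some y)."""
--     bset = {y for y in b if len(y) >= 3}
--     pset = set()
--     for y in bset:
--         for k in range(3, len(y) + 1):
--             pset.add(y[:k])
--     for x in a:
--         if len(x) < 3:
--             continue
--         if x in pset:
--             return True
--         for k in range(3, len(x) + 1):
--             if x[:k] in bset:
--                 return True
--     return False
-- ===== Notes on version B (the rewrite author's own statement) =====
-- stated objective: alternative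
-- what changed: Replaced the all-pairs startswith scan by indexing b once: a hash set of b's long tokens and a hash set of all their >=3-char prefixes, so each token of a is decided by prefix lookups instead of a scan over b; it trades A's early exit on the first matching pair for the one-time index.
import Mathlib
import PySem

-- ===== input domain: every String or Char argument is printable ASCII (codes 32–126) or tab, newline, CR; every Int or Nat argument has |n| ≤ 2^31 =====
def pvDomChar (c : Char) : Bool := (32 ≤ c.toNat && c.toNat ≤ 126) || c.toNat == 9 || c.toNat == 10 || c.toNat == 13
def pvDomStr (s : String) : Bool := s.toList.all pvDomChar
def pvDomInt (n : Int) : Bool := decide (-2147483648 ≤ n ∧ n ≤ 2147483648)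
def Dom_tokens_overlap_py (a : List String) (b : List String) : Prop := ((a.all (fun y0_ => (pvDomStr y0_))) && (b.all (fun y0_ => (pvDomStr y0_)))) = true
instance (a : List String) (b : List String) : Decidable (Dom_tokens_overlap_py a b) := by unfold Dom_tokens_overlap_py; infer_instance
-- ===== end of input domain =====

-- B replaces A's all-pairs startswith scan by indexing b once (token set + prefix set) and
-- deciding each token of a by set lookups; equal return value on all inputs (A is total).

-- ===== PORT A =====
def tokens_overlap_py (a : List String) (b : List String) : Bool :=
  a.any fun x => b.any fun y =>
    if PySem.Str.len x < 3 ∨ PySem.Str.len y < 3 then false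
    else PySem.Str.startswith x y || PySem.Str.startswith y x

-- ===== PORT B =====
-- bset = {y for y in b if len(y) >= 3}
def pvBset (b : List String) : PySem.Set String :=
  PySem.Set.ofList (b.filter fun y => decide (3 ≤ PySem.Str.len y))

-- pset = {y[:k] for y in bset for k in range(3, len(y)+1)}, built by the two nested loops of Source B
def pvPset (b : List String) : PySem.Set String :=
  (pvBset b).foldl (fun p y =>
      (PySem.List.pyRange 3 (PySem.Str.len y + 1) 1).foldl
        (fun p k => PySem.Set.add p (PySem.Str.slice y none (some k))) p)
    PySem.Set.empty

def tokens_overlap_py_alt (a : List String) (b : List String) : Bool :=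
  a.any fun x =>
    decide (3 ≤ PySem.Str.len x) &&
      (PySem.Set.contains (pvPset b) x ||
       (PySem.List.pyRange 3 (PySem.Str.len x + 1) 1).any
         (fun k => PySem.Set.contains (pvBset b) (PySem.Str.slice x none (some k))))

-- ===== PRECONDITION & SPEC =====
def Spec_tokens_overlap_py (a : List String) (b : List String) (out : Bool) : Prop := out = tokens_overlap_py_alt a b
instance (a : List String) (b : List String) (out : Bool) : Decidable (Spec_tokens_overlap_py a b out) := by unfold Spec_tokens_overlap_py; infer_instance

-- ===== CLAIM (what is proved, stated in full; the proofs are below) =====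
def Claim_equal_tokens_overlap_py : Prop := ∀ (a : List String) (b : List String), Dom_tokens_overlap_py a b → Spec_tokens_overlap_py a b (tokens_overlap_py a b)

-- ===== LEMMAS AND PROOFS =====

-- the overlap relation both programs decide per pair
def pvOvl (x y : String) : Prop :=
  3 ≤ x.toList.length ∧ 3 ≤ y.toList.length ∧ (y.toList <+: x.toList ∨ x.toList <+: y.toList)

lemma pair_iff (x y : String) :
    ((if PySem.Str.len x < 3 ∨ PySem.Str.len y < 3 then false
      else PySem.Str.startswith x y || PySem.Str.startswith y x) = true) ↔ pvOvl x y := by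
  simp only [PySem.Str.len_eq, PySem.Str.startswith_eq]
  split_ifs with h
  · simp only [false_iff, pvOvl]
    intro ⟨h1, h2, _⟩; omega
  · push Not at h
    simp only [Bool.or_eq_true, PySem.Chars.startswith_iff, pvOvl]
    constructor
    · intro hp; exact ⟨by omega, by omega, hp⟩
    · intro ⟨_, _, hp⟩; exact hp

lemma A_iff (a b : List String) :
    tokens_overlap_py a b = true ↔ ∃ x ∈ a, ∃ y ∈ b, pvOvl x y := by
  simp only [tokens_overlap_py, List.any_eq_true, pair_iff]

lemma mem_bset (b : List String) (y : String) :
    y ∈ pvBset b ↔ y ∈ b ∧ 3 ≤ y.toList.length := by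
  simp only [pvBset, PySem.Set.mem_ofList, List.mem_filter, decide_eq_true_eq,
    PySem.Str.len_eq]
  constructor <;> rintro ⟨h1, h2⟩ <;> exact ⟨h1, by exact_mod_cast h2⟩

lemma mem_foldl_add (g : Int → String) (l : List Int) (p : PySem.Set String) (s : String) :
    s ∈ l.foldl (fun p k => PySem.Set.add p (g k)) p ↔ s ∈ p ∨ ∃ k ∈ l, g k = s := by
  induction l generalizing p with
  | nil => simp
  | cons k l ih =>
    simp only [List.foldl_cons, ih, PySem.Set.mem_add, List.mem_cons]
    constructor
    · rintro (⟨hp | he⟩ | ⟨k', hk', he⟩)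
      · exact Or.inl hp
      · exact Or.inr ⟨k, Or.inl rfl, he.symm⟩
      · exact Or.inr ⟨k', Or.inr hk', he⟩
    · rintro (hp | ⟨k', (rfl | hk'), he⟩)
      · exact Or.inl (Or.inl hp)
      · exact Or.inl (Or.inr he.symm)
      · exact Or.inr ⟨k', hk', he⟩

lemma mem_pset (b : List String) (s : String) :
    s ∈ pvPset b ↔ ∃ y ∈ pvBset b, ∃ k ∈ PySem.List.pyRange 3 (PySem.Str.len y + 1) 1,
      PySem.Str.slice y none (some k) = s := by
  unfold pvPset
  generalize pvBset b = ys
  have : ∀ (p : PySem.Set String),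
      s ∈ ys.foldl (fun p y =>
        (PySem.List.pyRange 3 (PySem.Str.len y + 1) 1).foldl
          (fun p k => PySem.Set.add p (PySem.Str.slice y none (some k))) p) p ↔
      s ∈ p ∨ ∃ y ∈ ys, ∃ k ∈ PySem.List.pyRange 3 (PySem.Str.len y + 1) 1,
        PySem.Str.slice y none (some k) = s := by
    induction ys with
    | nil => simp
    | cons y ys ih =>
      intro p
      simp only [List.foldl_cons, ih, mem_foldl_add, List.mem_cons]
      constructor
      · rintro (⟨hp | ⟨k, hk, he⟩⟩ | ⟨y', hy', hrest⟩)
        · exact Or.inl hp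
        · exact Or.inr ⟨y, Or.inl rfl, k, hk, he⟩
        · exact Or.inr ⟨y', Or.inr hy', hrest⟩
      · rintro (hp | ⟨y', (rfl | hy'), hrest⟩)
        · exact Or.inl (Or.inl hp)
        · exact Or.inl (Or.inr hrest)
        · exact Or.inr ⟨y', hy', hrest⟩
  simpa using this PySem.Set.empty

-- the k-loop over range(3, len(y)+1) enumerates exactly the >=3-char prefixes of y
lemma slice_pref (y s : String) :
    (∃ k ∈ PySem.List.pyRange 3 (PySem.Str.len y + 1) 1,
      PySem.Str.slice y none (some k) = s) ↔
    3 ≤ s.toList.length ∧ s.toList <+: y.toList := by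
  constructor
  · rintro ⟨k, hk, rfl⟩
    rw [PySem.List.mem_pyRange_one] at hk
    rw [PySem.Str.len_eq] at hk
    have h0 : (0:Int) ≤ k := by omega
    have htl : (PySem.Str.slice y none (some k)).toList = y.toList.take k.toNat := by
      rw [PySem.Str.toList_slice, PySem.Chars.slice_eq_listSlice, PySem.List.slice_to _ h0]
    rw [htl]
    refine ⟨?_, List.take_prefix _ _⟩
    rw [List.length_take]
    omega
  · rintro ⟨hlen, hpre⟩
    refine ⟨(s.toList.length : Int), ?_, ?_⟩
    · rw [PySem.List.mem_pyRange_one, PySem.Str.len_eq]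
      have := hpre.length_le
      omega
    · apply String.toList_inj.mp
      rw [PySem.Str.toList_slice, PySem.Chars.slice_eq_listSlice,
        PySem.List.slice_to _ (by omega : (0:Int) ≤ (s.toList.length : Int))]
      simp only [Int.toNat_natCast]
      exact (List.prefix_iff_eq_take.mp hpre).symm

lemma B_iff (a b : List String) :
    tokens_overlap_py_alt a b = true ↔ ∃ x ∈ a, ∃ y ∈ b, pvOvl x y := by
  simp only [tokens_overlap_py_alt, List.any_eq_true, Bool.and_eq_true, Bool.or_eq_true,
    decide_eq_true_eq, PySem.Set.contains_iff, PySem.Str.len_eq]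
  constructor
  · rintro ⟨x, hx, hxl, hmem⟩
    have hxl' : 3 ≤ x.toList.length := by exact_mod_cast hxl
    rcases hmem with hps | ⟨k, hk, hbs⟩
    · -- x is a >=3-prefix of some long token of b
      rcases (mem_pset b x).mp hps with ⟨y, hy, hk⟩
      rcases (mem_bset b y).mp hy with ⟨hyb, hyl⟩
      rcases (slice_pref y x).mp hk with ⟨_, hpre⟩
      exact ⟨x, hx, y, hyb, hxl', hyl, Or.inr hpre⟩
    · -- some >=3-prefix of x is a long token of b
      rcases (mem_bset b _).mp hbs with ⟨hyb, hyl⟩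
      have hk' : ∃ k' ∈ PySem.List.pyRange 3 (PySem.Str.len x + 1) 1,
          PySem.Str.slice x none (some k') = PySem.Str.slice x none (some k) := ⟨k, hk, rfl⟩
      rcases (slice_pref x _).mp hk' with ⟨_, hpre⟩
      exact ⟨x, hx, _, hyb, hxl', hyl, Or.inl hpre⟩
  · rintro ⟨x, hx, y, hy, hxl, hyl, hpre⟩
    refine ⟨x, hx, by exact_mod_cast hxl, ?_⟩
    rcases hpre with hyx | hxy
    · -- y <+: x : the prefix x[:len(y)] is in bset
      right
      rcases (slice_pref x y).mpr ⟨hyl, hyx⟩ with ⟨k, hk, he⟩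
      refine ⟨k, ?_, ?_⟩
      · rw [PySem.Str.len_eq] at hk; exact hk
      · rw [he]; exact (mem_bset b y).mpr ⟨hy, hyl⟩
    · -- x <+: y : x itself is in pset
      left
      exact (mem_pset b x).mpr ⟨y, (mem_bset b y).mpr ⟨hy, hyl⟩,
        (slice_pref y x).mpr ⟨hxl, hxy⟩⟩

-- ===== VERDICT (by name: the statement is the Claim_ definition above) =====
theorem tokens_overlap_py_spec : Claim_equal_tokens_overlap_py := by
  intro a b _
  unfold Spec_tokens_overlap_py
  rcases hB : tokens_overlap_py_alt a b with _ | _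
  · rcases hA : tokens_overlap_py a b with _ | _
    · rfl
    · exact absurd ((B_iff a b).mpr ((A_iff a b).mp hA)) (by simp [hB])
  · exact (A_iff a b).mpr ((B_iff a b).mp hB)
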